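-- pv_equiv track=rewrite | github.com/junjange/uttug-seuja-algorithm | 조준장/level3/징검다리 건너기.py | solution
-- ===== SOURCE A (Python) =====
-- def solution(stones, k):
--     answer = 0
--     start = 1
--     end = max(stones)
--
--     while start <= end:
--         cnt = 0
--         mid = (start+end) // 2
--
--         for stone in stones:
--             if (stone - mid) <= 0:
--                 cnt += 1
--             else:
--                 cnt = 0
--
--             if cnt >= k:
--                 break
--
--         if cnt >= k:
--             answer = mid
--             end = mid-1
--
--         else:
--             start = mid+1
--
--
--
--     return answer
-- ===== SOURCE B (Python) =====
-- def solution(stones, k):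
--     # Sliding-window minimum of window maxima via a monotonic deque (one pass),
--     # instead of A's binary search over thresholds.
--     dq = []          # (index, value) pairs; values strictly decreasing from dq[head]
--     head = 0         # front of the live deque (entries before head are expired)
--     best = None      # min over completed windows of the window maximum
--     i = 0
--     for s in stones:
--         while len(dq) > head and dq[-1][1] <= s:
--             dq.pop()
--         dq.append((i, s))
--         if dq[head][0] <= i - k:
--             head += 1
--         if i >= k - 1:
--             w = dq[head][1]
--             if best is None or w < best:
--                 best = w
--         i += 1
--     return best if best is not None else 0
-- ===== Notes on version B (the rewrite author's own statement) =====
-- stated objective: alternative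
-- what changed: A binary-searches the threshold in [1, max(stones)], rescanning all stones for each candidate; B makes one pass with a monotonic deque, taking the minimum over all length-k windows of the window maximum.
-- intended difference: On inputs with 1 <= k <= len(stones) where some k consecutive stones are all <= 0, the minimal window maximum lies below A's search range [1, max(stones)], so A returns the clamped 1 (or 0 when every stone is <= 0) while B returns the true minimal window maximum, the intended value of the search. — e.g. on solution([3, -1, 2], 1): A returns 1, B returns -1
-- outside the precondition, e.g. on solution([2], 0): A returns 1, B raises IndexError
import Mathlib
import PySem

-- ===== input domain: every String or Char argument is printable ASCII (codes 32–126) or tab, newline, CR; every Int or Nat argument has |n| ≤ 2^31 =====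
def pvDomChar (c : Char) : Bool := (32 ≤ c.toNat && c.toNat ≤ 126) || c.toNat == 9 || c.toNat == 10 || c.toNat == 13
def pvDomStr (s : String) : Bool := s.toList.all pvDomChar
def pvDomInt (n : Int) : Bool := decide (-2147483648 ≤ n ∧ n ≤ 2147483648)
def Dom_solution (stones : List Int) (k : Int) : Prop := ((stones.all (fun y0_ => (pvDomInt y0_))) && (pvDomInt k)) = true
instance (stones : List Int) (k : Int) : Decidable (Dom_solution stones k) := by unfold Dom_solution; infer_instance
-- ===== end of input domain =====

-- B replaces A's binary search over thresholds by a one-pass monotonic-deque sliding-window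
-- minimum of window maxima (a different algorithm; no speed is claimed here).


-- ===== PORT A =====
-- the inner `for stone in stones: ... if cnt >= k: break` loop, returning cnt at exit
def pvChk (k mid : Int) : List Int → Int → Int
  | [], cnt => cnt
  | s :: rest, cnt =>
    let cnt' := if s - mid ≤ 0 then cnt + 1 else 0
    if cnt' ≥ k then cnt' else pvChk k mid rest cnt'

-- the `while start <= end` binary-search loop
def pvALoop (stones : List Int) (k s e ans : Int) : Int :=
  if h : s ≤ e then
    let mid := PySem.Int.floordiv (s + e) 2
    if pvChk k mid stones 0 ≥ k then pvALoop stones k s (mid - 1) mid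
    else pvALoop stones k (mid + 1) e ans
  else ans
termination_by (e + 1 - s).toNat
decreasing_by
  · have hb := PySem.Int.floordiv_two_mid_bounds h; omega
  · have hb := PySem.Int.floordiv_two_mid_bounds h; omega

def solution (stones : List Int) (k : Int) : Int :=
  match PySem.List.max? stones (fun x => x) with
  | none => 0          -- Python's max([]) raises ValueError here (excluded by Pre_)
  | some e => pvALoop stones k 1 e 0

-- ===== PORT B =====
-- the `while len(dq) > head and dq[-1][1] <= s: dq.pop()` loop
def pvPop (head : Nat) (s : Int) (dq : List (Int × Int)) : List (Int × Int) :=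
  if h : head < dq.length ∧ (dq.getLastD (0, 0)).2 ≤ s then pvPop head s dq.dropLast else dq
termination_by dq.length
decreasing_by simp only [List.length_dropLast]; omega

-- the `for s in stones` loop of Source B; dq accesses are always in range on Pre_ inputs,
-- the getD defaults are never read there
def pvBGo (k : Int) : List Int → Int → List (Int × Int) → Nat → Option Int → Option Int
  | [], _, _, _, best => best
  | s :: rest, i, dq, head, best =>
    let dq1 := pvPop head s dq ++ [(i, s)]
    let head1 := if (dq1.getD head ((0 : Int), (0 : Int))).1 ≤ i - k then head + 1 else head
    let best1 :=
      if i ≥ k - 1 then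
        let w := (dq1.getD head1 ((0 : Int), (0 : Int))).2
        match best with
        | none => some w
        | some b => if w < b then some w else some b
      else best
    pvBGo k rest (i + 1) dq1 head1 best1

def solution_alt (stones : List Int) (k : Int) : Int :=
  match pvBGo k stones 0 [] 0 none with
  | some b => b
  | none => 0

-- ===== PRECONDITION & SPEC =====
-- Pre_ excludes empty stones, where A's max() raises ValueError, and k ≤ 0 (outside the
-- problem's domain of positive jump widths), where B's window algorithm raises IndexError
-- while A returns an accidental 0 or 1 coming from clamping its search range to [1, max(stones)].
def Pre_solution (stones : List Int) (k : Int) : Prop := stones ≠ [] ∧ 1 ≤ k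
instance (stones : List Int) (k : Int) : Decidable (Pre_solution stones k) := by
  unfold Pre_solution; infer_instance

def pvWitness_solution : List Int × Int := ([2, 4, 5, 3, 2, 1, 4], 3)

-- On stones lists (1 ≤ k ≤ len(stones)) where some k consecutive stones are all ≤ 0 — so the
-- minimal window maximum lies below A's search range [1, max(stones)] — A returns the clamped
-- value 1 (or 0 when every stone is ≤ 0), while B returns the true minimal window maximum,
-- the intended value of the search.
def D_solution (stones : List Int) (k : Int) : Prop :=
  1 ≤ k ∧ k.toNat ≤ stones.length ∧
  (∃ i ∈ List.range (stones.length - k.toNat + 1), ∀ s ∈ (stones.drop i).take k.toNat, s ≤ 0) ∧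
  ¬ ((∀ s ∈ stones, s ≤ 0) ∧
     ∀ i ∈ List.range (stones.length - k.toNat + 1), ∃ s ∈ (stones.drop i).take k.toNat, s = 0)
instance (stones : List Int) (k : Int) : Decidable (D_solution stones k) := by
  unfold D_solution; infer_instance

def Spec_solution (stones : List Int) (k : Int) (out : Int) : Prop :=
  ¬ D_solution stones k → out = solution_alt stones k
instance (stones : List Int) (k : Int) (out : Int) : Decidable (Spec_solution stones k out) := by
  unfold Spec_solution; infer_instance

def pvDiffWitness_solution : List Int × Int := ([3, -1, 2], 1)
def pvDiffWitnessOut_solution : Int × Int := (1, -1)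


-- ===== CLAIM (what is proved, stated in full; the proofs are below) =====
def Claim_unchanged_solution : Prop := ∀ (stones : List Int) (k : Int), Dom_solution stones k → Pre_solution stones k → Spec_solution stones k (solution stones k)
def Claim_changed_solution : Prop := Dom_solution (pvDiffWitness_solution.1) (pvDiffWitness_solution.2) ∧ Pre_solution (pvDiffWitness_solution.1) (pvDiffWitness_solution.2) ∧ D_solution (pvDiffWitness_solution.1) (pvDiffWitness_solution.2) ∧ solution (pvDiffWitness_solution.1) (pvDiffWitness_solution.2) = pvDiffWitnessOut_solution.1 ∧ solution_alt (pvDiffWitness_solution.1) (pvDiffWitness_solution.2) = pvDiffWitnessOut_solution.2 ∧ pvDiffWitnessOut_solution.1 ≠ pvDiffWitnessOut_solution.2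
def Claim_exact_solution : Prop := ∀ (stones : List Int) (k : Int), Dom_solution stones k → Pre_solution stones k → D_solution stones k → solution stones k ≠ solution_alt stones k

-- ===== LEMMAS AND PROOFS =====

-- max/min of a nonempty list of ints (junk 0 on [])
def vmax : List Int → Int
  | [] => 0
  | x :: xs => xs.foldl max x
def vmin : List Int → Int
  | [] => 0
  | x :: xs => xs.foldl min x

-- the window of length kn starting at i, and its maximum
def wnd (l : List Int) (kn i : Nat) : List Int := (l.drop i).take kn
def wmx (l : List Int) (kn i : Nat) : Int := vmax (wnd l kn i)

-- window maxima of the windows completed at steps j ≥ i (in step order)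
def WL (l : List Int) (kn i : Nat) : List Int :=
  (List.range' i (l.length - i)).filterMap
    (fun j => if kn ≤ j + 1 then some (wmx l kn (j + 1 - kn)) else none)

-- "some k consecutive stones are all ≤ mid" on the list l
def hasW (l : List Int) (kn : Nat) (mid : Int) : Prop :=
  ∃ i, i + kn ≤ l.length ∧ ∀ s ∈ wnd l kn i, s ≤ mid

-- the enumerated slice [a, b) of stones, as (index, value) pairs
def ewin (l : List Int) (a b : Nat) : List (Int × Int) :=
  (List.range' a (b - a)).map (fun (j : Nat) => ((j : Int), List.getD l j 0))

-- the entries the monotonic deque keeps: those larger than every later entry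
def keepB (w : List (Int × Int)) (p : Int × Int) : Bool :=
  w.all (fun q => decide (p.1 < q.1 → q.2 < p.2))
def rmx (w : List (Int × Int)) : List (Int × Int) := w.filter (keepB w)

-- the running min-with-None accumulator of Source B
def accMin (best : Option Int) (xs : List Int) : Option Int :=
  xs.foldl (fun b w => match b with
    | none => some w
    | some b' => if w < b' then some w else some b') best


theorem vmax_basic : ∀ (xs : List Int) (a : Int),
    (xs.foldl max a = a ∨ xs.foldl max a ∈ xs) ∧ a ≤ xs.foldl max a ∧
      ∀ x ∈ xs, x ≤ xs.foldl max a := by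
  intro xs
  induction xs with
  | nil => intro a; exact ⟨Or.inl rfl, le_refl _, by simp⟩
  | cons x xs ih =>
    intro a
    obtain ⟨h1, h2, h3⟩ := ih (max a x)
    refine ⟨?_, ?_, ?_⟩
    · rcases h1 with h | h
      · rcases max_choice a x with hc | hc
        · exact Or.inl (by rw [List.foldl_cons, h, hc])
        · exact Or.inr (by rw [List.foldl_cons, h, hc]; exact List.mem_cons_self ..)
      · exact Or.inr (List.mem_cons_of_mem _ h)
    · exact le_trans (le_max_left a x) h2
    · intro y hy
      rcases List.mem_cons.mp hy with rfl | hy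
      · exact le_trans (le_max_right a y) h2
      · exact h3 y hy

theorem vmin_basic : ∀ (xs : List Int) (a : Int),
    (xs.foldl min a = a ∨ xs.foldl min a ∈ xs) ∧ xs.foldl min a ≤ a ∧
      ∀ x ∈ xs, xs.foldl min a ≤ x := by
  intro xs
  induction xs with
  | nil => intro a; exact ⟨Or.inl rfl, le_refl _, by simp⟩
  | cons x xs ih =>
    intro a
    obtain ⟨h1, h2, h3⟩ := ih (min a x)
    refine ⟨?_, ?_, ?_⟩
    · rcases h1 with h | h
      · rcases min_choice a x with hc | hc
        · exact Or.inl (by rw [List.foldl_cons, h, hc])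
        · exact Or.inr (by rw [List.foldl_cons, h, hc]; exact List.mem_cons_self ..)
      · exact Or.inr (List.mem_cons_of_mem _ h)
    · exact le_trans h2 (min_le_left a x)
    · intro y hy
      rcases List.mem_cons.mp hy with rfl | hy
      · exact le_trans h2 (min_le_right a y)
      · exact h3 y hy

theorem vmax_mem {l : List Int} (h : l ≠ []) : vmax l ∈ l := by
  match l with
  | x :: xs =>
    rcases (vmax_basic xs x).1 with h1 | h1
    · simp only [vmax]; rw [h1]; exact List.mem_cons_self ..
    · exact List.mem_cons_of_mem _ h1

theorem le_vmax {l : List Int} {x : Int} (h : x ∈ l) : x ≤ vmax l := by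
  match l with
  | y :: ys =>
    rcases List.mem_cons.mp h with rfl | h
    · exact (vmax_basic ys x).2.1
    · exact (vmax_basic ys y).2.2 x h

theorem vmax_le_iff {l : List Int} (h : l ≠ []) (c : Int) :
    vmax l ≤ c ↔ ∀ x ∈ l, x ≤ c :=
  ⟨fun hv x hx => le_trans (le_vmax hx) hv, fun hall => hall _ (vmax_mem h)⟩

theorem vmin_mem {l : List Int} (h : l ≠ []) : vmin l ∈ l := by
  match l with
  | x :: xs =>
    rcases (vmin_basic xs x).1 with h1 | h1
    · simp only [vmin]; rw [h1]; exact List.mem_cons_self ..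
    · exact List.mem_cons_of_mem _ h1

theorem vmin_le {l : List Int} {x : Int} (h : x ∈ l) : vmin l ≤ x := by
  match l with
  | y :: ys =>
    rcases List.mem_cons.mp h with rfl | h
    · exact (vmin_basic ys x).2.1
    · exact (vmin_basic ys y).2.2 x h

theorem vmin_le_iff {l : List Int} (h : l ≠ []) (c : Int) :
    vmin l ≤ c ↔ ∃ x ∈ l, x ≤ c :=
  ⟨fun hv => ⟨vmin l, vmin_mem h, hv⟩, fun ⟨x, hx, hxc⟩ => le_trans (vmin_le hx) hxc⟩

theorem WL_mem {l : List Int} {kn : Nat} (hkn : 1 ≤ kn) (x : Int) :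
    x ∈ WL l kn 0 ↔ ∃ i, i + kn ≤ l.length ∧ x = wmx l kn i := by
  simp only [WL, List.mem_filterMap, List.mem_range'_1]
  constructor
  · rintro ⟨j, ⟨-, hj⟩, hopt⟩
    by_cases hkj : kn ≤ j + 1
    · rw [if_pos hkj] at hopt
      exact ⟨j + 1 - kn, by omega, (Option.some_inj.mp hopt).symm⟩
    · rw [if_neg hkj] at hopt; exact absurd hopt (by simp)
  · rintro ⟨i, hi, rfl⟩
    refine ⟨i + kn - 1, ⟨by omega, by omega⟩, ?_⟩
    have he : i + kn - 1 + 1 - kn = i := by omega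
    rw [if_pos (by omega), he]

theorem WL_ne_nil {l : List Int} {kn : Nat} (hkn : 1 ≤ kn) (hknn : kn ≤ l.length) :
    WL l kn 0 ≠ [] :=
  List.ne_nil_of_mem ((WL_mem hkn _).mpr ⟨0, by omega, rfl⟩)

theorem wnd_ne_nil {l : List Int} {kn i : Nat} (hkn : 1 ≤ kn) (hi : i + kn ≤ l.length) :
    wnd l kn i ≠ [] := by
  have : (wnd l kn i).length = min kn (l.length - i) := by
    simp [wnd]
  intro hcon
  rw [hcon] at this
  simp at this
  omega

theorem hasW_iff {l : List Int} {kn : Nat} (hkn : 1 ≤ kn) (hknn : kn ≤ l.length) (mid : Int) :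
    hasW l kn mid ↔ vmin (WL l kn 0) ≤ mid := by
  constructor
  · rintro ⟨i, hi, hall⟩
    have hw : wmx l kn i ≤ mid := (vmax_le_iff (wnd_ne_nil hkn hi) mid).mpr hall
    have hmem : wmx l kn i ∈ WL l kn 0 := (WL_mem hkn _).mpr ⟨i, hi, rfl⟩
    exact le_trans (vmin_le hmem) hw
  · intro hv
    obtain ⟨x, hx, hxm⟩ := (vmin_le_iff (WL_ne_nil hkn hknn) mid).mp hv
    obtain ⟨i, hi, rfl⟩ := (WL_mem hkn _).mp hx
    exact ⟨i, hi, fun s hs => le_trans (le_vmax hs) hxm⟩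

theorem mV_le_M {l : List Int} {kn : Nat} {M : Int} (hkn : 1 ≤ kn) (hknn : kn ≤ l.length)
    (hM : PySem.List.max? l (fun x => x) = some M) : vmin (WL l kn 0) ≤ M := by
  obtain ⟨i, hi, hv⟩ := (WL_mem hkn _).mp (vmin_mem (WL_ne_nil hkn hknn))
  have h1 : wmx l kn i ∈ wnd l kn i := vmax_mem (wnd_ne_nil hkn hi)
  have h2 : wmx l kn i ∈ l :=
    List.mem_of_mem_drop (List.mem_of_mem_take h1)
  rw [hv]
  exact PySem.List.max?_isMax hM _ h2

theorem chk_iff {k mid : Int} {kn : Nat} (hkn : 1 ≤ kn) (hk : k = (kn : Int)) :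
    ∀ (l : List Int) (c : Int), 0 ≤ c → c < k →
      (k ≤ pvChk k mid l c ↔
        (∃ j : Nat, j ≤ l.length ∧ k ≤ c + (j : Int) ∧ ∀ s ∈ l.take j, s ≤ mid) ∨
          hasW l kn mid) := by
  intro l
  induction l with
  | nil =>
    intro c hc0 hck
    simp only [pvChk, List.length_nil, List.take_nil, hasW, wnd]
    constructor
    · intro h; omega
    · rintro (⟨j, hj0, hjk, -⟩ | ⟨i, hile, -⟩)
      · omega
      · simp at hile; omega
  | cons x rest ih =>
    intro c hc0 hck
    rw [pvChk]
    by_cases hsm : x - mid ≤ 0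
    · rw [if_pos hsm]
      by_cases hbr : k ≤ c + 1
      · rw [if_pos hbr]
        refine iff_of_true hbr (Or.inl ⟨1, by simp, by push_cast; omega, ?_⟩)
        intro t ht
        simp [List.take_succ_cons] at ht
        omega
      · rw [if_neg hbr, ih (c + 1) (by omega) (by omega)]
        constructor
        · rintro (⟨j, hjlen, hjk, hall⟩ | ⟨i, hile, hall⟩)
          · refine Or.inl ⟨j + 1, by simpa using hjlen, by push_cast at hjk ⊢; omega, ?_⟩
            intro t ht
            rw [List.take_succ_cons] at ht
            rcases List.mem_cons.mp ht with rfl | ht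
            · omega
            · exact hall t ht
          · exact Or.inr ⟨i + 1, by simp only [List.length_cons]; omega,
              by simpa [wnd, List.drop_succ_cons] using hall⟩
        · rintro (⟨j, hjlen, hjk, hall⟩ | ⟨i, hile, hall⟩)
          · obtain ⟨j', rfl⟩ : ∃ j', j = j' + 1 := by
              rcases j with _ | j'
              · exfalso; push_cast at hjk; omega
              · exact ⟨j', rfl⟩
            refine Or.inl ⟨j', by simp at hjlen; omega, by push_cast at hjk ⊢; omega, ?_⟩
            intro t ht
            exact hall t (by rw [List.take_succ_cons]; exact List.mem_cons_of_mem _ ht)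
          · rcases i with _ | i'
            · refine Or.inl ⟨kn - 1, ?_, by push_cast; omega, ?_⟩
              · simp only [List.length_cons] at hile; omega
              · intro t ht
                refine hall t ?_
                simp only [wnd, List.drop_zero]
                obtain ⟨kn', rfl⟩ : ∃ kn', kn = kn' + 1 := ⟨kn - 1, by omega⟩
                rw [List.take_succ_cons]
                exact List.mem_cons_of_mem _ (by simpa using ht)
            · exact Or.inr ⟨i', by simp only [List.length_cons] at hile; omega,
                by simpa [wnd, List.drop_succ_cons] using hall⟩
    · rw [if_neg hsm]
      rw [if_neg (by omega), ih 0 le_rfl (by omega)]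
      constructor
      · rintro (⟨j, hjlen, hjk, hall⟩ | ⟨i, hile, hall⟩)
        · refine Or.inr ⟨1, by simp only [List.length_cons]; push_cast at hjk; omega, ?_⟩
          intro t ht
          simp only [wnd, List.drop_succ_cons, List.drop_zero] at ht
          refine hall t ?_
          have hkj : kn ≤ j := by push_cast at hjk; omega
          have : List.take kn rest = List.take kn (List.take j rest) := by
            rw [List.take_take]; congr 1; omega
          rw [this] at ht
          exact List.mem_of_mem_take ht
        · exact Or.inr ⟨i + 1, by simp only [List.length_cons]; omega,
            by simpa [wnd, List.drop_succ_cons] using hall⟩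
      · rintro (⟨j, hjlen, hjk, hall⟩ | ⟨i, hile, hall⟩)
        · exfalso
          obtain ⟨j', rfl⟩ : ∃ j', j = j' + 1 := by
            rcases j with _ | j'
            · exfalso; push_cast at hjk; omega
            · exact ⟨j', rfl⟩
          have : x ≤ mid := hall x (by rw [List.take_succ_cons]; exact List.mem_cons_self ..)
          omega
        · rcases i with _ | i'
          · exfalso
            have : x ≤ mid := by
              refine hall x ?_
              simp only [wnd, List.drop_zero]
              obtain ⟨kn', rfl⟩ : ∃ kn', kn = kn' + 1 := ⟨kn - 1, by omega⟩
              rw [List.take_succ_cons]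
              exact List.mem_cons_self ..
            omega
          · exact Or.inr ⟨i', by simp only [List.length_cons] at hile; omega,
              by simpa [wnd, List.drop_succ_cons] using hall⟩

theorem chk_top {k mid : Int} {kn : Nat} (hkn : 1 ≤ kn) (hk : k = (kn : Int)) (l : List Int) :
    k ≤ pvChk k mid l 0 ↔ hasW l kn mid := by
  rw [chk_iff hkn hk l 0 le_rfl (by omega)]
  constructor
  · rintro (⟨j, hjlen, hjk, hall⟩ | h)
    · refine ⟨0, by push_cast at hjk; omega, ?_⟩
      intro t ht
      simp only [wnd, List.drop_zero] at ht
      have hkj : kn ≤ j := by push_cast at hjk; omega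
      have : List.take kn l = List.take kn (List.take j l) := by
        rw [List.take_take]; congr 1; omega
      rw [this] at ht
      exact hall t (List.mem_of_mem_take ht)
    · exact h
  · exact Or.inr

theorem aloop_char {stones : List Int} {k m_ : Int}
    (hP : ∀ x : Int, (k ≤ pvChk k x stones 0) ↔ m_ ≤ x) :
    ∀ (N : Nat) (s e ans : Int), (e + 1 - s).toNat ≤ N →
      pvALoop stones k s e ans = if max s m_ ≤ e then max s m_ else ans := by
  intro N
  induction N with
  | zero =>
    intro s e ans hN
    rw [pvALoop, dif_neg (by omega)]
    have h1 : s ≤ max s m_ := le_max_left s m_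
    rw [if_neg (by omega)]
  | succ n ihn =>
    intro s e ans hN
    rw [pvALoop]
    by_cases hse : s ≤ e
    · rw [dif_pos hse]
      have hb := PySem.Int.floordiv_two_mid_bounds hse
      set F := PySem.Int.floordiv (s + e) 2 with hF
      by_cases hcnt : pvChk k F stones 0 ≥ k
      · rw [if_pos hcnt, ihn s (F - 1) F (by omega)]
        have hmF : m_ ≤ F := (hP F).mp hcnt
        have h1 : max s m_ ≤ F := max_le hb.1 hmF
        have h2 : s ≤ max s m_ := le_max_left s m_
        by_cases hc : max s m_ ≤ F - 1
        · rw [if_pos hc, if_pos (by omega)]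
        · rw [if_neg hc, if_pos (by omega)]
          omega
      · rw [if_neg hcnt, ihn (F + 1) e ans (by omega)]
        have hmF : ¬ m_ ≤ F := fun h => hcnt ((hP F).mpr h)
        rw [max_eq_right (by omega : (F + 1 : Int) ≤ m_),
            max_eq_right (by omega : s ≤ m_)]
    · rw [dif_neg hse]
      have h1 : s ≤ max s m_ := le_max_left s m_
      rw [if_neg (by omega)]

theorem aloop_none {stones : List Int} {k : Int}
    (hno : ∀ x : Int, ¬ (k ≤ pvChk k x stones 0)) :
    ∀ (N : Nat) (s e ans : Int), (e + 1 - s).toNat ≤ N → pvALoop stones k s e ans = ans := by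
  intro N
  induction N with
  | zero =>
    intro s e ans hN
    rw [pvALoop, dif_neg (by omega)]
  | succ n ihn =>
    intro s e ans hN
    rw [pvALoop]
    by_cases hse : s ≤ e
    · rw [dif_pos hse]
      have hb := PySem.Int.floordiv_two_mid_bounds hse
      rw [if_neg (hno _), ihn _ e ans (by omega)]
    · rw [dif_neg hse]

theorem keepB_iff {w : List (Int × Int)} {p : Int × Int} :
    keepB w p = true ↔ ∀ q ∈ w, p.1 < q.1 → q.2 < p.2 := by
  simp only [keepB, List.all_eq_true, decide_eq_true_eq]

theorem ewin_snoc {l : List Int} {a b : Nat} (hab : a ≤ b) :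
    ewin l a (b + 1) = ewin l a b ++ [((b : Int), List.getD l b 0)] := by
  simp only [ewin]
  have h1 : b + 1 - a = (b - a) + 1 := by omega
  have h2 : a + 1 * (b - a) = b := by omega
  rw [h1, List.range'_concat, h2, List.map_append]
  rfl

theorem ewin_cons {l : List Int} {a b : Nat} (hab : a < b) :
    ewin l a b = ((a : Int), List.getD l a 0) :: ewin l (a + 1) b := by
  simp only [ewin]
  have h1 : b - a = (b - (a + 1)) + 1 := by omega
  rw [h1, List.range'_succ]
  simp

theorem ewin_fst_mem {l : List Int} {a b : Nat} {p : Int × Int} (hp : p ∈ ewin l a b) :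
    (a : Int) ≤ p.1 ∧ p.1 < (b : Int) := by
  simp only [ewin, List.mem_map] at hp
  obtain ⟨j, hj, rfl⟩ := hp
  rw [List.mem_range'_1] at hj
  refine ⟨?_, ?_⟩
  · show (a : Int) ≤ (j : Int); exact_mod_cast hj.1
  · show (j : Int) < (b : Int); exact_mod_cast (show j < b by omega)

theorem ewin_fst_pairwise (l : List Int) (a b : Nat) :
    (ewin l a b).Pairwise (fun p q => p.1 < q.1) := by
  simp only [ewin]
  refine List.Pairwise.map _ ?_ (List.pairwise_lt_range' 1)
  intro m n hmn
  show (m : Int) < (n : Int)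
  exact_mod_cast hmn

theorem map_getD_range' (l : List Int) : ∀ (len a : Nat), a + len ≤ l.length →
    (List.range' a len).map (fun j => List.getD l j 0) = (l.drop a).take len := by
  intro len
  induction len with
  | zero => simp
  | succ m ih =>
    intro a ha
    rw [List.range'_succ, List.map_cons, ih (a + 1) (by omega)]
    have hlt : a < l.length := by omega
    rw [List.drop_eq_getElem_cons hlt, List.take_succ_cons, List.getD_eq_getElem _ _ hlt]

theorem ewin_snd {l : List Int} {a b : Nat} (hb : b ≤ l.length) :
    (ewin l a b).map (·.2) = (l.drop a).take (b - a) := by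
  by_cases hab : a ≤ b
  · have := map_getD_range' l (b - a) a (by omega)
    simpa [ewin, List.map_map, Function.comp] using this
  · have h0 : b - a = 0 := by omega
    simp [ewin, h0]

theorem keepB_cons_of_mem {x p : Int × Int} {w : List (Int × Int)}
    (hx : x.1 < p.1) : keepB (x :: w) p = keepB w p := by
  simp only [keepB, List.all_cons]
  have hd : decide (p.1 < x.1 → x.2 < p.2) = true := by
    simp only [decide_eq_true_eq]
    intro h; omega
  rw [hd, Bool.true_and]

theorem rmx_cons {x : Int × Int} {w : List (Int × Int)}
    (hlt : ∀ q ∈ w, x.1 < q.1) :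
    rmx (x :: w) = (if keepB (x :: w) x then [x] else []) ++ rmx w := by
  simp only [rmx, List.filter_cons]
  rw [List.filter_congr (fun p hp => keepB_cons_of_mem (hlt p hp))]
  by_cases h : keepB (x :: w) x <;> simp [h]

theorem keepB_snoc_self {w : List (Int × Int)} {x : Int × Int}
    (hlt : ∀ q ∈ w, q.1 < x.1) : keepB (w ++ [x]) x = true := by
  rw [keepB_iff]
  intro q hq
  rcases List.mem_append.mp hq with hq | hq
  · intro h; exact absurd (hlt q hq) (by omega)
  · simp at hq; subst hq; intro h; omega

theorem keepB_snoc_of_mem {w : List (Int × Int)} {x p : Int × Int}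
    (hp : p.1 < x.1) : keepB (w ++ [x]) p = (keepB w p && decide (x.2 < p.2)) := by
  simp only [keepB, List.all_append, List.all_cons, List.all_nil, Bool.and_true]
  congr 1
  apply decide_eq_decide.mpr
  constructor
  · intro h; exact h hp
  · intro h _; exact h

theorem rmx_snoc {w : List (Int × Int)} {x : Int × Int}
    (hlt : ∀ q ∈ w, q.1 < x.1) :
    rmx (w ++ [x]) = (rmx w).filter (fun p => decide (x.2 < p.2)) ++ [x] := by
  simp only [rmx, List.filter_append, List.filter_cons, keepB_snoc_self hlt, if_pos,
    List.filter_nil]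
  congr 1
  rw [List.filter_congr (fun p hp => keepB_snoc_of_mem (hlt p hp)), List.filter_filter]
  exact List.filter_congr (fun p hp => by rw [Bool.and_comm])

theorem rmx_pairwise_snd {w : List (Int × Int)}
    (hfst : w.Pairwise (fun p q => p.1 < q.1)) :
    (rmx w).Pairwise (fun p q => q.2 < p.2) := by
  rw [rmx, List.pairwise_filter]
  refine hfst.imp_of_mem ?_
  intro a b ha hb hab hka hkb
  exact (keepB_iff.mp hka) b hb hab

theorem rmx_ne_nil {w : List (Int × Int)} (hw : w ≠ [])
    (hfst : w.Pairwise (fun p q => p.1 < q.1)) : rmx w ≠ [] := by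
  induction w with
  | nil => exact absurd rfl hw
  | cons x w ih =>
    have hpc := List.pairwise_cons.mp hfst
    rw [rmx_cons hpc.1]
    rcases w with _ | ⟨y, w'⟩
    · simp [rmx, keepB]
    · have h2 := ih (by simp) hpc.2
      simp only [ne_eq, List.append_eq_nil_iff]
      rintro ⟨-, hcon⟩
      exact h2 hcon

theorem rmx_head_snd {w : List (Int × Int)} (hw : w ≠ [])
    (hfst : w.Pairwise (fun p q => p.1 < q.1)) (d : Int × Int) :
    ((rmx w).headD d).2 = vmax (w.map (·.2)) := by
  induction w with
  | nil => exact absurd rfl hw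
  | cons x w ih =>
    have hpc := List.pairwise_cons.mp hfst
    rw [rmx_cons hpc.1]
    rcases w with _ | ⟨y, w'⟩
    · simp [rmx, keepB, vmax]
    · set t := y :: w' with ht
      have hne : t ≠ [] := by simp [ht]
      have iht := ih hne hpc.2
      have htm : t.map (·.2) ≠ [] := by simp [ht]
      by_cases hk : keepB (x :: t) x
      · rw [if_pos hk]
        simp only [List.singleton_append, List.headD_cons]
        have h1 : ∀ q ∈ t, q.2 < x.2 := fun q hq =>
          (keepB_iff.mp hk) q (List.mem_cons_of_mem _ hq) (hpc.1 q hq)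
        have hmem := vmax_mem (show (x :: t).map (·.2) ≠ [] by simp)
        have hle : x.2 ≤ vmax ((x :: t).map (·.2)) := le_vmax (by simp)
        rw [List.map_cons] at hmem hle ⊢
        rcases List.mem_cons.mp hmem with heq | hmem
        · omega
        · obtain ⟨q, hq, hq2⟩ := List.mem_map.mp hmem
          have := h1 q hq
          omega
      · rw [if_neg hk]
        simp only [List.nil_append, iht]
        have hq : ∃ q ∈ t, x.2 ≤ q.2 := by
          by_contra hcon
          push_neg at hcon
          apply hk
          rw [keepB_iff]
          intro q hqm hq1
          rcases List.mem_cons.mp hqm with rfl | hqm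
          · omega
          · exact hcon q hqm
        obtain ⟨q, hqt, hxq⟩ := hq
        have h1 : vmax (t.map (·.2)) ≤ vmax ((x :: t).map (·.2)) := by
          refine le_vmax ?_
          rw [List.map_cons]
          exact List.mem_cons_of_mem _ (vmax_mem htm)
        have h2 : vmax ((x :: t).map (·.2)) ≤ vmax (t.map (·.2)) := by
          rw [List.map_cons]
          have hmem := vmax_mem (show (x :: t).map (·.2) ≠ [] by simp)
          rw [List.map_cons] at hmem
          rcases List.mem_cons.mp hmem with heq | hmem
          · rw [heq]
            exact le_trans hxq (le_vmax (List.mem_map_of_mem hqt))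
          · exact le_vmax hmem
        omega

theorem pop_spec : ∀ (live dead : List (Int × Int)) (s : Int),
    live.Pairwise (fun p q => q.2 < p.2) →
    pvPop dead.length s (dead ++ live) = dead ++ live.filter (fun p => decide (s < p.2)) := by
  intro live
  induction live using List.reverseRecOn with
  | nil =>
    intro dead s _
    rw [pvPop, dif_neg (by simp)]
    simp
  | append_singleton l p ih =>
    intro dead s hpw
    have hassoc : dead ++ (l ++ [p]) = (dead ++ l) ++ [p] := by simp
    have hlast : ((dead ++ (l ++ [p])).getLastD (0, 0)) = p := by
      rw [hassoc, List.getLastD_concat]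
    by_cases hps : p.2 ≤ s
    · rw [pvPop, dif_pos ⟨by simp, by rw [hlast]; exact hps⟩]
      have hdrop : (dead ++ (l ++ [p])).dropLast = dead ++ l := by
        rw [hassoc, List.dropLast_concat]
      rw [hdrop, ih dead s (List.Pairwise.sublist (List.sublist_append_left l [p]) hpw)]
      congr 1
      rw [List.filter_append]
      simp [show ¬ s < p.2 by omega]
    · rw [pvPop, dif_neg (fun hc => hps (by rw [hlast] at hc; exact hc.2))]
      congr 1
      symm
      rw [List.filter_eq_self]
      intro q hq
      rcases List.mem_append.mp hq with hq | hq
      · have hpq : p.2 < q.2 :=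
          (List.pairwise_append.mp hpw).2.2 q hq p (List.mem_singleton_self p)
        simp only [decide_eq_true_eq]
        omega
      · simp only [List.mem_singleton] at hq
        subst hq
        simp only [decide_eq_true_eq]
        omega

theorem accMin_some : ∀ (xs : List Int) (b : Int), accMin (some b) xs = some (xs.foldl min b) := by
  intro xs
  induction xs with
  | nil => intro b; rfl
  | cons x xs ih =>
    intro b
    show accMin (if x < b then some x else some b) xs = _
    by_cases h : x < b
    · rw [if_pos h, List.foldl_cons, min_eq_right (by omega), ih]
    · rw [if_neg h, List.foldl_cons, min_eq_left (by omega), ih]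

theorem WL_step {l : List Int} {kn i : Nat} (h : i < l.length) :
    WL l kn i =
      if kn ≤ i + 1 then wmx l kn (i + 1 - kn) :: WL l kn (i + 1) else WL l kn (i + 1) := by
  simp only [WL]
  have h1 : l.length - i = (l.length - (i + 1)) + 1 := by omega
  rw [h1, List.range'_succ]
  by_cases hki : kn ≤ i + 1 <;> simp [hki]

theorem WL_nil {l : List Int} {kn : Nat} (h : l.length < kn) : WL l kn 0 = [] := by
  rw [WL, List.filterMap_eq_nil_iff]
  intro j hj
  rw [List.mem_range'_1] at hj
  rw [if_neg (by omega)]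

theorem foldl_isSome (f : Option Int → Int → Option Int)
    (hf : ∀ o x, o.isSome = true → (f o x).isSome = true) :
    ∀ (xs : List Int) (acc : Option Int), acc.isSome = true →
      (List.foldl f acc xs).isSome = true := by
  intro xs
  induction xs with
  | nil => intro acc h; exact h
  | cons x xs ih => intro acc h; rw [List.foldl_cons]; exact ih _ (hf acc x h)

theorem max?_isSome {l : List Int} (h : l ≠ []) :
    ∃ M, PySem.List.max? l (fun x => x) = some M := by
  obtain ⟨x, xs, rfl⟩ := List.exists_cons_of_ne_nil h
  rw [← Option.isSome_iff_exists]
  unfold PySem.List.max?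
  rw [List.foldl_cons]
  refine foldl_isSome _ ?_ _ _ ?_
  · intro o y ho
    cases o with
    | none => rfl
    | some m => dsimp only; split <;> rfl
  · rfl

theorem ewin_ne_nil {l : List Int} {a b : Nat} (hab : a < b) : ewin l a b ≠ [] := by
  have : (ewin l a b).length = b - a := by simp [ewin]
  intro hcon
  rw [hcon] at this
  simp at this
  omega

theorem rmx_head_mem {w : List (Int × Int)} (hw : w ≠ [])
    (hfst : w.Pairwise (fun p q => p.1 < q.1)) (d : Int × Int) :
    (rmx w).headD d ∈ w := by
  have hne := rmx_ne_nil hw hfst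
  obtain ⟨x, xs, hx⟩ := List.exists_cons_of_ne_nil hne
  have hxm : x ∈ rmx w := by rw [hx]; exact List.mem_cons_self ..
  simp only [rmx] at hxm
  rw [hx]
  exact List.mem_of_mem_filter hxm

theorem getD_append_len {α : Type} (dead L : List α) (d : α) :
    (dead ++ L).getD dead.length d = L.headD d := by
  rw [List.getD_append_right dead L d dead.length le_rfl, Nat.sub_self]
  cases L <;> rfl

theorem bgo_run {stones : List Int} {k : Int} {kn : Nat} (hkn : 1 ≤ kn) (hk : k = (kn : Int)) :
    ∀ (cnt i : Nat) (dead : List (Int × Int)) (best : Option Int),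
      i + cnt = stones.length →
      pvBGo k (stones.drop i) ((i : Nat) : Int)
          (dead ++ rmx (ewin stones (i - min i kn) i)) dead.length best
        = accMin best (WL stones kn i) := by
  intro cnt
  induction cnt with
  | zero =>
    intro i dead best hi
    have hieq : i = stones.length := by omega
    subst hieq
    rw [List.drop_length]
    show best = accMin best (WL stones kn stones.length)
    rw [WL, Nat.sub_self, List.range'_zero, List.filterMap_nil]
    rfl
  | succ m ih =>
    intro i dead best hi
    have hilt : i < stones.length := by omega
    set a := i - min i kn with ha
    have hsa : a ≤ i := by omega
    have hgd : List.getD stones i 0 = stones[i] := List.getD_eq_getElem _ _ hilt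
    rw [List.drop_eq_getElem_cons hilt]
    simp only [pvBGo]
    -- the pop-and-append step
    have hpop : pvPop dead.length (stones[i]) (dead ++ rmx (ewin stones a i)) ++
        [(((i : Nat) : Int), stones[i])] = dead ++ rmx (ewin stones a (i + 1)) := by
      rw [pop_spec _ dead _ (rmx_pairwise_snd (ewin_fst_pairwise stones a i)),
        List.append_assoc]
      congr 1
      rw [ewin_snoc hsa, rmx_snoc (fun q hq => (ewin_fst_mem hq).2), hgd]
    rw [hpop]
    -- the final window for step i ends at i+1 and starts at a'
    set a' := (i + 1) - min (i + 1) kn with ha'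
    have ha'2 : a' ≤ i := by omega
    have hwfst := ewin_fst_pairwise stones a' (i + 1)
    have hwne : ewin stones a' (i + 1) ≠ [] := ewin_ne_nil (by omega)
    have hrne : rmx (ewin stones a' (i + 1)) ≠ [] := rmx_ne_nil hwne hwfst
    -- the deque after the (possible) front eviction is dead' ++ rmx (ewin a' (i+1))
    -- with head pointing at its live front
    have hmain : ∃ dead' : List (Int × Int),
        dead ++ rmx (ewin stones a (i + 1)) = dead' ++ rmx (ewin stones a' (i + 1)) ∧
        (if ((dead ++ rmx (ewin stones a (i + 1))).getD dead.length (0, 0)).1 ≤ ((i : Nat) : Int) - k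
          then dead.length + 1 else dead.length) = dead'.length := by
      by_cases hik : kn ≤ i
      · -- the window is full: a = i - kn, a' = a + 1
        have haa : a = i - kn := by omega
        have haa' : a' = a + 1 := by omega
        have hcons : ewin stones a (i + 1) =
            ((a : Int), List.getD stones a 0) :: ewin stones a' (i + 1) := by
          rw [haa']; exact ewin_cons (by omega)
        have hlt2 : ∀ q ∈ ewin stones a' (i + 1), ((a : Int), List.getD stones a 0).1 < q.1 := by
          intro q hq
          have h1 := (ewin_fst_mem hq).1
          have h2 : ((a : Int)) < ((a' : Nat) : Int) := by omega
          omega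
        rw [hcons, rmx_cons hlt2]
        by_cases hkeep : keepB (((a : Int), List.getD stones a 0) :: ewin stones a' (i + 1))
            ((a : Int), List.getD stones a 0) = true
        · rw [if_pos hkeep]
          refine ⟨dead ++ [((a : Int), List.getD stones a 0)], by simp, ?_⟩
          have hfront : ((dead ++ ([((a : Int), List.getD stones a 0)] ++
              rmx (ewin stones a' (i + 1)))).getD dead.length (0, 0)) =
              ((a : Int), List.getD stones a 0) := by
            rw [getD_append_len]; rfl
          rw [hfront, if_pos (by rw [hk]; show (a : Int) ≤ ((i : Nat) : Int) - (kn : Int); omega)]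
          simp
        · rw [if_neg hkeep]
          refine ⟨dead, by simp, ?_⟩
          have hmem : (rmx (ewin stones a' (i + 1))).headD (0, 0) ∈ ewin stones a' (i + 1) :=
            rmx_head_mem hwne hwfst _
          have h1 := (ewin_fst_mem hmem).1
          have hfront : ((dead ++ ([] ++ rmx (ewin stones a' (i + 1)))).getD dead.length (0, 0)) =
              (rmx (ewin stones a' (i + 1))).headD (0, 0) := by
            rw [List.nil_append, getD_append_len]
          rw [hfront, if_neg (by rw [hk]; omega)]
      · -- window not yet full: a = a' = 0 and nothing is evicted
        have haa2 : a = a' := by omega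
        refine ⟨dead, by rw [haa2], ?_⟩
        rw [haa2, getD_append_len]
        have hmem : (rmx (ewin stones a' (i + 1))).headD (0, 0) ∈ ewin stones a' (i + 1) :=
          rmx_head_mem hwne hwfst _
        have h1 := (ewin_fst_mem hmem).1
        have h2 : (0 : Int) ≤ ((a' : Nat) : Int) := by omega
        rw [if_neg (by rw [hk]; omega)]
    obtain ⟨dead', hdq, hhd⟩ := hmain
    rw [hhd, hdq]
    -- the best update
    have hbest : (if ((i : Nat) : Int) ≥ k - 1 then
        (match best with
          | none => some (((dead' ++ rmx (ewin stones a' (i + 1))).getD dead'.length (0, 0)).2)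
          | some b =>
            if ((dead' ++ rmx (ewin stones a' (i + 1))).getD dead'.length (0, 0)).2 < b then
              some (((dead' ++ rmx (ewin stones a' (i + 1))).getD dead'.length (0, 0)).2)
            else some b)
        else best) = accMin best (if kn ≤ i + 1 then [wmx stones kn a'] else []) := by
      by_cases hfull : kn ≤ i + 1
      · have hcond : ((i : Nat) : Int) ≥ k - 1 := by
          rw [hk]
          have : (kn : Int) ≤ (i : Int) + 1 := by exact_mod_cast (by omega : kn ≤ i + 1)
          omega
        rw [if_pos hcond, if_pos hfull]
        have hval : ((dead' ++ rmx (ewin stones a' (i + 1))).getD dead'.length (0, 0)).2 =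
            wmx stones kn a' := by
          rw [getD_append_len]
          have h1 := rmx_head_snd hwne hwfst (0, 0)
          rw [h1, ewin_snd (by omega)]
          have h2 : i + 1 - a' = kn := by omega
          rw [h2]
          rfl
        rw [hval]
        rfl
      · have hcond : ¬ ((i : Nat) : Int) ≥ k - 1 := by
          rw [hk]
          have : (i : Int) + 1 < (kn : Int) := by exact_mod_cast (by omega : i + 1 < kn)
          omega
        rw [if_neg hcond, if_neg hfull]
        rfl
    rw [hbest]
    have hci : ((i : Nat) : Int) + 1 = (((i + 1 : Nat)) : Int) := by push_cast; ring
    rw [hci, ih (i + 1) dead' _ (by omega)]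
    rw [WL_step hilt]
    by_cases hfull : kn ≤ i + 1
    · rw [if_pos hfull, if_pos hfull]
      have : a' = i + 1 - kn := by omega
      rw [this]
      rfl
    · rw [if_neg hfull, if_neg hfull]
      rfl


theorem accMin_none_cons (x : Int) (xs : List Int) :
    accMin none (x :: xs) = some (xs.foldl min x) := by
  rw [show accMin none (x :: xs) = accMin (some x) xs from rfl, accMin_some]

theorem A_val {stones : List Int} {k M : Int} {kn : Nat}
    (hkn : 1 ≤ kn) (hk : k = (kn : Int)) (hsz : kn ≤ stones.length)
    (hM : PySem.List.max? stones (fun x => x) = some M) :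
    solution stones k =
      if max 1 (vmin (WL stones kn 0)) ≤ M then max 1 (vmin (WL stones kn 0)) else 0 := by
  have hP : ∀ x : Int, (k ≤ pvChk k x stones 0) ↔ vmin (WL stones kn 0) ≤ x :=
    fun x => (chk_top hkn hk stones).trans (hasW_iff hkn hsz x)
  unfold solution
  rw [hM]
  show pvALoop stones k 1 M 0 = _
  exact aloop_char hP ((M + 1 - 1).toNat) 1 M 0 le_rfl

theorem bgo_init {stones : List Int} {k : Int} {kn : Nat}
    (hkn : 1 ≤ kn) (hk : k = (kn : Int)) :
    pvBGo k stones 0 [] 0 none = accMin none (WL stones kn 0) := by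
  have h := bgo_run (stones := stones) hkn hk stones.length 0 [] none (by omega)
  rw [List.drop_zero, Nat.cast_zero, Nat.zero_sub] at h
  rw [show ewin stones 0 0 = [] from by simp [ewin]] at h
  rw [show rmx ([] : List (Int × Int)) = [] from rfl, List.nil_append, List.length_nil] at h
  exact h

theorem B_val_small {stones : List Int} {k : Int} {kn : Nat}
    (hkn : 1 ≤ kn) (hk : k = (kn : Int)) (hsz : kn ≤ stones.length) :
    solution_alt stones k = vmin (WL stones kn 0) := by
  unfold solution_alt
  rw [bgo_init hkn hk]
  obtain ⟨x, xs, hwl⟩ := List.exists_cons_of_ne_nil (WL_ne_nil hkn hsz)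
  rw [hwl, accMin_none_cons]
  rfl

theorem B_val_big {stones : List Int} {k : Int} {kn : Nat}
    (hkn : 1 ≤ kn) (hk : k = (kn : Int)) (hsz : stones.length < kn) :
    solution_alt stones k = 0 := by
  unfold solution_alt
  rw [bgo_init hkn hk, WL_nil hsz]
  rfl

theorem bridge1 {stones : List Int} {kn : Nat} (hkn : 1 ≤ kn) (hsz : kn ≤ stones.length) :
    ((∃ i ∈ List.range (stones.length - kn + 1), ∀ s ∈ (stones.drop i).take kn, s ≤ 0)
      ↔ vmin (WL stones kn 0) ≤ 0) := by
  rw [← hasW_iff hkn hsz 0]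
  unfold hasW wnd
  constructor
  · rintro ⟨i, hi, hall⟩
    rw [List.mem_range] at hi
    exact ⟨i, by omega, hall⟩
  · rintro ⟨i, hi, hall⟩
    exact ⟨i, by rw [List.mem_range]; omega, hall⟩

theorem bridge2 {stones : List Int} {M : Int}
    (hM : PySem.List.max? stones (fun x => x) = some M) :
    ((∀ s ∈ stones, s ≤ 0) ↔ M ≤ 0) :=
  ⟨fun h => h M (PySem.List.max?_mem hM),
   fun h s hs => le_trans (PySem.List.max?_isMax hM s hs) h⟩

theorem wmx_nonpos {stones : List Int} {kn i : Nat} (hkn : 1 ≤ kn)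
    (hi : i + kn ≤ stones.length) (hall : ∀ s ∈ stones, s ≤ 0) :
    wmx stones kn i ≤ 0 :=
  (vmax_le_iff (wnd_ne_nil hkn hi) 0).mpr
    (fun s hs => hall s (List.mem_of_mem_drop (List.mem_of_mem_take hs)))

theorem bridge3 {stones : List Int} {kn : Nat} (hkn : 1 ≤ kn) (hsz : kn ≤ stones.length)
    (hall : ∀ s ∈ stones, s ≤ 0) :
    ((∀ i ∈ List.range (stones.length - kn + 1), ∃ s ∈ (stones.drop i).take kn, s = 0)
      ↔ vmin (WL stones kn 0) = 0) := by
  constructor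
  · intro h
    have hwl : ∀ x ∈ WL stones kn 0, x = 0 := by
      intro x hx
      obtain ⟨i, hi, rfl⟩ := (WL_mem hkn _).mp hx
      obtain ⟨s0, hs0, hs00⟩ := h i (by rw [List.mem_range]; omega)
      have hge : (0 : Int) ≤ wmx stones kn i := by
        rw [← hs00]
        exact le_vmax hs0
      have hle := wmx_nonpos hkn hi hall
      omega
    exact hwl _ (vmin_mem (WL_ne_nil hkn hsz))
  · intro hv i hi
    rw [List.mem_range] at hi
    have hik : i + kn ≤ stones.length := by omega
    have h1 : vmin (WL stones kn 0) ≤ wmx stones kn i :=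
      vmin_le ((WL_mem hkn _).mpr ⟨i, hik, rfl⟩)
    have hle := wmx_nonpos hkn hik hall
    have hz : wmx stones kn i = 0 := by omega
    exact ⟨wmx stones kn i, vmax_mem (wnd_ne_nil hkn hik), hz⟩

-- ===== VERDICT (by name: the statement is the Claim_ definition above) =====
theorem solution_spec : Claim_unchanged_solution := by
  intro stones k _ hpre
  unfold Spec_solution
  intro hD
  unfold D_solution at hD
  obtain ⟨hne, hk1⟩ := hpre
  set kn := k.toNat with hknd
  have hk : k = (kn : Int) := by omega
  have hkn : 1 ≤ kn := by omega
  by_cases hsz : kn ≤ stones.length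
  · obtain ⟨M, hM⟩ := max?_isSome hne
    rw [A_val hkn hk hsz hM, B_val_small hkn hk hsz]
    set m := vmin (WL stones kn 0) with hm
    have hmM : m ≤ M := mV_le_M hkn hsz hM
    by_cases hm1 : 1 ≤ m
    · rw [max_eq_right hm1, if_pos hmM]
    · have hD' : (∀ s ∈ stones, s ≤ 0) ∧
          ∀ i ∈ List.range (stones.length - kn + 1), ∃ s ∈ (stones.drop i).take kn, s = 0 := by
        by_contra hcon
        exact hD ⟨hk1, hsz, (bridge1 hkn hsz).mpr (by omega), hcon⟩
      obtain ⟨hall, hwin0⟩ := hD'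
      have hM0 : M ≤ 0 := (bridge2 hM).mp hall
      have hm0 : m = 0 := (bridge3 hkn hsz hall).mp hwin0
      rw [hm0, show max (1 : Int) 0 = 1 from max_eq_left (by norm_num), if_neg (by omega)]
  · rw [B_val_big hkn hk (by omega)]
    obtain ⟨M, hM⟩ := max?_isSome hne
    have hno : ∀ x : Int, ¬ (k ≤ pvChk k x stones 0) := by
      intro x hx
      have hW : hasW stones kn x := (chk_top hkn hk stones).mp hx
      obtain ⟨i, hik, -⟩ := hW
      omega
    unfold solution
    rw [hM]
    show pvALoop stones k 1 M 0 = 0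
    exact aloop_none hno ((M + 1 - 1).toNat) 1 M 0 le_rfl

theorem solution_changed : Claim_changed_solution := by
  unfold Claim_changed_solution
  refine ⟨by decide, by decide, by decide, ?_, ?_, by decide⟩
  · show solution [3, -1, 2] 1 = 1
    simp [solution, PySem.List.max?, pvALoop, pvChk, PySem.Int.floordiv]
  · show solution_alt [3, -1, 2] 1 = -1
    simp [solution_alt, pvBGo, pvPop]

theorem solution_tight : Claim_exact_solution := by
  intro stones k _ hpre hD
  unfold D_solution at hD
  obtain ⟨hne, hk1⟩ := hpre
  set kn := k.toNat with hknd
  have hk : k = (kn : Int) := by omega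
  have hkn : 1 ≤ kn := by omega
  obtain ⟨-, hsz, hwin, hnot⟩ := hD
  obtain ⟨M, hM⟩ := max?_isSome hne
  rw [A_val hkn hk hsz hM, B_val_small hkn hk hsz]
  set m := vmin (WL stones kn 0) with hm
  have hm0 : m ≤ 0 := (bridge1 hkn hsz).mp hwin
  by_cases hM0 : M ≤ 0
  · have hall := (bridge2 hM).mpr hM0
    have hmne : m ≠ 0 := fun h => hnot ⟨hall, (bridge3 hkn hsz hall).mpr h⟩
    rw [show max (1 : Int) m = 1 from max_eq_left (by omega), if_neg (by omega)]
    omega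
  · rw [show max (1 : Int) m = 1 from max_eq_left (by omega), if_pos (by omega)]
    omega
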